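-- pv_equiv track=rewrite | github.com/JunioDamasceno/sistema_financeiro2 | sistema_bancario2.py | filtrar_usuarios
-- ===== SOURCE A (Python) =====
-- def filtrar_usuarios(cpf, usuarios):
--     resultado = ""
--     for usuario in usuarios:
--         if usuario['CPF'] == cpf:
--             resultado = usuario
--
--     if resultado != "":
--         return resultado
--     else:
--         return None
-- ===== SOURCE B (Python) =====
-- def filtrar_usuarios(cpf, usuarios):
--     for usuario in reversed(list(usuarios)):
--         if usuario['CPF'] == cpf:
--             return usuario
--     return None
-- ===== Notes on version B (the rewrite author's own statement) =====
-- stated objective: simpler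
-- what changed: Replaces the forward full scan that accumulates the last match into a string sentinel with a reverse scan that returns the first match immediately (the last forward match), avoiding the sentinel and the wasted tail of the scan.
import Mathlib
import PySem

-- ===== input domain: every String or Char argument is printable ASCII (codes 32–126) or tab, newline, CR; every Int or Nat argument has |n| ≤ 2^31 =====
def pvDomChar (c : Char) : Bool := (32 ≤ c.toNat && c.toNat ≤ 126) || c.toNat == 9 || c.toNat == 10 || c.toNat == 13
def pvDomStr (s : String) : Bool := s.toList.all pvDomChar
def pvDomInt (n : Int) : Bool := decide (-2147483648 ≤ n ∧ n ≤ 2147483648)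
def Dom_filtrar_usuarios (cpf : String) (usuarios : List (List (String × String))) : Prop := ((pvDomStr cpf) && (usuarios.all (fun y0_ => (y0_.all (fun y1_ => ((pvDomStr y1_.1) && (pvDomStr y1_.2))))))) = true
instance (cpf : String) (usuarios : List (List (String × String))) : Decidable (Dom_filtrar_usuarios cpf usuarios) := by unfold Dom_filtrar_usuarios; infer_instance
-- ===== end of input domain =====

-- B replaces A's forward scan with a string sentinel by a reverse scan returning the first match.
-- ===== PORT A =====
-- forward loop: resultado starts as the sentinel (here: none), each matching user overwrites it
def filtrar_usuarios (cpf : String) (usuarios : List (List (String × String))) : Option (List (String × String)) :=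
  let resultado := usuarios.foldl
    (fun acc usuario =>
      if PySem.Dict.get? ⟨usuario⟩ "CPF" = some cpf then some usuario else acc)
    none
  resultado

-- ===== PORT B =====
-- reverse scan with early return (first match in reverse order)
def pvRevFind (cpf : String) : List (List (String × String)) → Option (List (String × String))
  | [] => none
  | usuario :: rest =>
      if PySem.Dict.get? ⟨usuario⟩ "CPF" = some cpf then some usuario
      else pvRevFind cpf rest

def filtrar_usuarios_alt (cpf : String) (usuarios : List (List (String × String))) : Option (List (String × String)) :=
  pvRevFind cpf usuarios.reverse

-- ===== PRECONDITION & SPEC =====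
-- Pre_ excludes exactly the inputs on which A raises KeyError: a user dict without the key "CPF".
def Pre_filtrar_usuarios (cpf : String) (usuarios : List (List (String × String))) : Prop :=
  ∀ u ∈ usuarios, (PySem.Dict.get? ⟨u⟩ "CPF").isSome
instance (cpf : String) (usuarios : List (List (String × String))) : Decidable (Pre_filtrar_usuarios cpf usuarios) := by unfold Pre_filtrar_usuarios; infer_instance
def pvWitness_filtrar_usuarios : String × (List (List (String × String))) :=
  ("1", [[("CPF", "2")], [("CPF", "1"), ("nome", "ana")]])

def Spec_filtrar_usuarios (cpf : String) (usuarios : List (List (String × String))) (out : Option (List (String × String))) : Prop := out = filtrar_usuarios_alt cpf usuarios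
instance (cpf : String) (usuarios : List (List (String × String))) (out : Option (List (String × String))) : Decidable (Spec_filtrar_usuarios cpf usuarios out) := by unfold Spec_filtrar_usuarios; infer_instance

-- ===== CLAIM (what is proved, stated in full; the proofs are below) =====
def Claim_equal_filtrar_usuarios : Prop := ∀ (cpf : String) (usuarios : List (List (String × String))), Dom_filtrar_usuarios cpf usuarios → Pre_filtrar_usuarios cpf usuarios → Spec_filtrar_usuarios cpf usuarios (filtrar_usuarios cpf usuarios)

-- ===== LEMMAS AND PROOFS =====

theorem pvRevFind_append (cpf : String) (xs ys : List (List (String × String))) :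
    pvRevFind cpf (xs ++ ys) = (pvRevFind cpf xs).or (pvRevFind cpf ys) := by
  induction xs with
  | nil => simp [pvRevFind]
  | cons u rest ih =>
    simp only [List.cons_append, pvRevFind]
    split <;> simp [ih]

theorem foldl_eq_revFind (cpf : String) (usuarios : List (List (String × String)))
    (acc : Option (List (String × String))) :
    usuarios.foldl
      (fun acc usuario =>
        if PySem.Dict.get? ⟨usuario⟩ "CPF" = some cpf then some usuario else acc)
      acc = (pvRevFind cpf usuarios.reverse).or acc := by
  induction usuarios generalizing acc with
  | nil => simp [pvRevFind]
  | cons u rest ih =>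
    simp only [List.foldl_cons, ih, List.reverse_cons, pvRevFind_append, pvRevFind]
    split <;> cases pvRevFind cpf rest.reverse <;> simp [Option.or]

-- ===== VERDICT (by name: the statement is the Claim_ definition above) =====
theorem filtrar_usuarios_spec : Claim_equal_filtrar_usuarios := by
  intro cpf usuarios _ _
  unfold Spec_filtrar_usuarios filtrar_usuarios filtrar_usuarios_alt
  simp [foldl_eq_revFind]
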